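-- pv_equiv track=rewrite | github.com/aouichou/realms | backend/scripts/seed_database.py | map_classes
-- ===== SOURCE A (Python) =====
-- def map_classes(classes_str):
--     """Map comma-separated class string to JSONB dict"""
--     all_cls = [
--         "wizard",
--         "sorcerer",
--         "cleric",
--         "druid",
--         "bard",
--         "warlock",
--         "paladin",
--         "ranger",
--         "artificer",
--     ]
--     available = [c.strip().lower() for c in classes_str.split(",")]
--     return {cls: cls in available for cls in all_cls}
-- ===== SOURCE B (Python) =====
-- def map_classes(classes_str):
--     """Map comma-separated class string to JSONB dict"""
--     result = {
--         "wizard": False,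
--         "sorcerer": False,
--         "cleric": False,
--         "druid": False,
--         "bard": False,
--         "warlock": False,
--         "paladin": False,
--         "ranger": False,
--         "artificer": False,
--     }
--     for c in classes_str.split(","):
--         key = c.strip().lower()
--         if key in result:
--             result[key] = True
--     return result
-- ===== Notes on version B (the rewrite author's own statement) =====
-- stated objective: alternative
-- what changed: B pre-builds the all-False result dict and flips entries to True while scanning the parsed input once, instead of building the dict by scanning the whole parsed list once per fixed class name.
import Mathlib
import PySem

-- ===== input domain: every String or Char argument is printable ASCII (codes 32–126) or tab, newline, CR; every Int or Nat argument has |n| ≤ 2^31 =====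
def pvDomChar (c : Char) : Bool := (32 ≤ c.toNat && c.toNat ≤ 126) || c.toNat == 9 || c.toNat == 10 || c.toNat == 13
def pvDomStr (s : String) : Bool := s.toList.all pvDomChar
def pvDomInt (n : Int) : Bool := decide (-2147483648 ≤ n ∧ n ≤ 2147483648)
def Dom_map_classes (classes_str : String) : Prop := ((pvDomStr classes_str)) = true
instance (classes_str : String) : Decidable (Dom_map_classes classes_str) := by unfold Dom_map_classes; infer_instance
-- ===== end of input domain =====

-- B changes the decomposition: it pre-builds the all-False result dict and flips entries to True
-- in a single pass over the parsed input, instead of one membership scan per fixed class; same result.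

-- the fixed list of class names (shared helper)
def pvAllCls : List String :=
  ["wizard", "sorcerer", "cleric", "druid", "bard", "warlock", "paladin", "ranger", "artificer"]

-- normalisation applied to each comma-separated piece: c.strip().lower()
def pvNorm (c : String) : String := PySem.Str.lower (PySem.Str.strip c)

-- classes_str.split(","): sep is the nonempty literal ",", so split? is always some (getD never fires)
def pvSplit (s : String) : List String := (PySem.Str.split? s ",").getD []

-- ===== PORT A =====
def map_classes (classes_str : String) : List (String × Bool) :=
  let available := (pvSplit classes_str).map pvNorm
  pvAllCls.map (fun cls => (cls, available.contains cls))

-- ===== PORT B =====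
def map_classes_alt (classes_str : String) : List (String × Bool) :=
  let result0 : PySem.Dict String Bool :=
    PySem.Dict.ofList (pvAllCls.map (fun cls => (cls, false)))
  let result :=
    (pvSplit classes_str).foldl
      (fun d c =>
        let key := pvNorm c
        if d.contains key then d.insert key true else d)
      result0
  result.items

-- ===== PRECONDITION & SPEC =====
def Spec_map_classes (classes_str : String) (out : List (String × Bool)) : Prop := out = map_classes_alt classes_str
instance (classes_str : String) (out : List (String × Bool)) : Decidable (Spec_map_classes classes_str out) := by unfold Spec_map_classes; infer_instance

-- ===== CLAIM (what is proved, stated in full; the proofs are below) =====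
def Claim_equal_map_classes : Prop := ∀ (classes_str : String), Dom_map_classes classes_str → Spec_map_classes classes_str (map_classes classes_str)

-- ===== LEMMAS AND PROOFS =====

-- invariant of B's flipping loop: if the dict's items are the fixed class names with flags f,
-- then after the loop over l they are the class names with flags f ∨ (normalised membership in l)
lemma pv_fold_items (l : List String) (d : PySem.Dict String Bool) (f : String → Bool)
    (h : d.items = pvAllCls.map (fun cls => (cls, f cls))) :
    (l.foldl
        (fun d c =>
          let key := pvNorm c
          if d.contains key then d.insert key true else d)
        d).items
      = pvAllCls.map (fun cls => (cls, f cls || decide (cls ∈ l.map pvNorm))) := by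
  induction l generalizing d f with
  | nil => simpa using h
  | cons x xs ih =>
    simp only [List.foldl_cons]
    have hkeys : PySem.Dict.keys d = pvAllCls := by
      simp [PySem.Dict.keys, h, Function.comp_def]
    by_cases hc : PySem.Dict.contains d (pvNorm x) = true
    · rw [if_pos hc]
      rw [ih _ (fun cls => f cls || decide (cls = pvNorm x))
        (by
          rw [PySem.Dict.items_insert_of_contains d true hc, h, List.map_map]
          apply List.map_congr_left
          intro cls _
          by_cases he : cls = pvNorm x <;> simp [he])]
      apply List.map_congr_left
      intro cls _
      simp only [List.map_cons, List.mem_cons, Prod.mk.injEq, true_and]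
      by_cases he : cls = pvNorm x <;> simp [he]
    · rw [if_neg hc]
      rw [ih _ f h]
      apply List.map_congr_left
      intro cls hm
      have hne : cls ≠ pvNorm x := by
        intro he
        apply hc
        rw [PySem.Dict.contains_iff_mem_keys, hkeys, ← he]
        exact hm
      simp only [List.map_cons, List.mem_cons, Prod.mk.injEq, true_and]
      simp [hne]

-- the initial dict literal: its items are exactly the nine (name, false) pairs
lemma pv_items_init :
    (PySem.Dict.ofList (pvAllCls.map (fun cls => (cls, false)))).items
      = pvAllCls.map (fun cls => (cls, false)) := by decide

-- ===== VERDICT (by name: the statement is the Claim_ definition above) =====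
theorem map_classes_spec : Claim_equal_map_classes := by
  intro s _
  unfold Spec_map_classes map_classes map_classes_alt
  rw [pv_fold_items (pvSplit s) _ (fun _ => false) pv_items_init]
  apply List.map_congr_left
  intro cls _
  simp
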